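-- pv_equiv track=rewrite | github.com/JoetheManHowie/Spellsword | MonteCarlo.py | generate_words_from_tiles
-- ===== SOURCE A (Python) =====
-- from itertools import combinations
--
-- def generate_words_from_tiles(tiles, blank_count):
--     """Generate all possible words from the given tiles, considering one blank as wild."""
--     # Remove blanks from tiles list
--     real_tiles = [t for t in tiles if t != '0']
--     words = set()
--
--     # For each word length from 2 to min(7, number of tiles)
--     for length in range(2, min(8, len(tiles) + 1)):
--         # First, generate words without using blanks
--         for combo in combinations(real_tiles, length):
--             words.add(''.join(sorted(combo)))
--
--         # If we have a blank, generate words using one blank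
--         if blank_count > 0:
--             # For each possible length using one fewer real tile
--             for base_length in range(max(1, length - 1), length):
--                 for base_combo in combinations(real_tiles, base_length):
--                     # Get the unique set of letters we could add with the blank
--                     possible_letters = set(['A', 'B', 'C', 'D', 'X', 'Y', 'Z', 'J', 'K'])
--                     # Add each possible letter with the blank
--                     for letter in possible_letters:
--                         new_word = ''.join(sorted(base_combo + (letter,)))
--                         if len(new_word) >= 2:
--                             words.add(new_word)
--
--     return words
-- ===== SOURCE B (Python) =====
-- _LETTERS = ['A', 'B', 'C', 'D', 'X', 'Y', 'Z', 'J', 'K']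
--
--
-- def _insert_front(x, c):
--     # sorted((x,) + tuple(c)) for an already-sorted list c (x goes before equal elements)
--     i = 0
--     while i < len(c) and c[i] < x:
--         i += 1
--     return c[:i] + [x] + c[i:]
--
--
-- def _insert_back(x, c):
--     # sorted(tuple(c) + (x,)) for an already-sorted list c (x goes after equal elements)
--     i = 0
--     while i < len(c) and c[i] <= x:
--         i += 1
--     return c[:i] + [x] + c[i:]
--
--
-- def _sorted_combos(xs, i, r, memo):
--     # sorted versions of itertools.combinations(xs[i:], r), in the same order,
--     # kept sorted incrementally (shared via memo) instead of re-sorting every tuple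
--     if r == 0:
--         return [[]]
--     if i == len(xs):
--         return []
--     key = (i, r)
--     if key not in memo:
--         memo[key] = [_insert_front(xs[i], c)
--                      for c in _sorted_combos(xs, i + 1, r - 1, memo)] \
--             + _sorted_combos(xs, i + 1, r, memo)
--     return memo[key]
--
--
-- def generate_words_from_tiles(tiles, blank_count):
--     """Generate all possible words from the given tiles, considering one blank as wild."""
--     real_tiles = [t for t in tiles if t != '0']
--     top = min(7, len(tiles))
--     memo = {}
--     out = []
--     prev = _sorted_combos(real_tiles, 0, 1, memo)  # combos one shorter, reused for the blank
--     for length in range(2, top + 1):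
--         cur = _sorted_combos(real_tiles, 0, length, memo)
--         for c in cur:
--             out.append(''.join(c))
--         if blank_count > 0:
--             for c in prev:
--                 for letter in _LETTERS:
--                     w = ''.join(_insert_back(letter, c))
--                     if len(w) >= 2:
--                         out.append(w)
--         prev = cur
--     return set(out)
-- ===== Notes on version B (the rewrite author's own statement) =====
-- stated objective: alternative
-- what changed: Replaces per-length positional itertools.combinations with re-sorting of every tuple by a memoized suffix recursion that builds each combination already sorted via linear insertion, computes each size once and reuses the size-(length-1) list for the blank stage instead of recomputing it.
import Mathlib
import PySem

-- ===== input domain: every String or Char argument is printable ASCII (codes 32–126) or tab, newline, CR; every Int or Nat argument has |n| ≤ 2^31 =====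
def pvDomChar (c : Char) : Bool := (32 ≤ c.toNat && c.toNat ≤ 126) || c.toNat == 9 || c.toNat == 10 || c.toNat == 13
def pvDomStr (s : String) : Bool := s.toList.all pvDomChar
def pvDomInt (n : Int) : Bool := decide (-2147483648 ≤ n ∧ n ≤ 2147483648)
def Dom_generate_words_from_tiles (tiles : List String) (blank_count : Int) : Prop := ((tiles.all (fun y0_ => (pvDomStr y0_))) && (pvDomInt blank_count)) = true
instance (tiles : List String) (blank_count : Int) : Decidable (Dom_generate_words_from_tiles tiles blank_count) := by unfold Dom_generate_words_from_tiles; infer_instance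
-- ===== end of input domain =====

-- ===== PORT A =====
-- B re-implements A by building each combination already sorted (memoized suffix recursion +
-- linear insertion) and reusing the size-(length-1) combos for the blank stage; alternative
-- algorithm, same cost class.  Both programs return a set; equality below is on the PySem.Set lists.

-- possible_letters = set(['A',...,'K']): nine distinct literals, so the set is exactly this list.
-- Python's hash iteration order over the set is not modelled; it is ported in source order (the
-- resulting words SET does not depend on the order, and set outputs are compared as sets).
def pvLetters : List String := ["A", "B", "C", "D", "X", "Y", "Z", "J", "K"]

def generate_words_from_tiles (tiles : List String) (blank_count : Int) : List String :=
  let real_tiles := tiles.filter (fun t => t ≠ "0")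
  let words : PySem.Set String := PySem.Set.empty
  (PySem.List.pyRange 2 (min 8 (PySem.List.len tiles + 1))).foldl (fun words length =>
    -- combinations(real_tiles, length): length comes from range(2, …) so it is ≥ 2; .toNat is exact
    let words := (PySem.List.combinations real_tiles length.toNat).foldl
      (fun words combo => PySem.Set.add words (PySem.Str.join "" (PySem.List.sorted combo id))) words
    if blank_count > 0 then
      (PySem.List.pyRange (max 1 (length - 1)) length).foldl (fun words base_length =>
        (PySem.List.combinations real_tiles base_length.toNat).foldl (fun words base_combo =>
          pvLetters.foldl (fun words letter =>
            let new_word := PySem.Str.join "" (PySem.List.sorted (base_combo ++ [letter]) id)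
            if 2 ≤ PySem.Str.len new_word then PySem.Set.add words new_word else words)
            words) words) words
    else words) words

-- ===== PORT B =====
-- _insert_front: the while-loop linear scan + slice, as structural recursion (exact: same list)
def insertFront (x : String) : List String → List String
  | [] => [x]
  | y :: ys => if y < x then y :: insertFront x ys else x :: y :: ys

-- _insert_back: same scan but stepping over elements ≤ x (exact: same list)
def insertBack (x : String) : List String → List String
  | [] => [x]
  | y :: ys => if y ≤ x then y :: insertBack x ys else x :: y :: ys

-- _sorted_combos(xs, i, r, memo): recursion on the suffix xs[i:], ported as structural recursion
-- on the suffix list (the memo table only shares work; the values are identical)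
def sortedCombos (xs : List String) (r : Nat) : List (List String) :=
  match r, xs with
  | 0, _ => [[]]
  | _ + 1, [] => []
  | r + 1, x :: tail => (sortedCombos tail r).map (insertFront x) ++ sortedCombos tail (r + 1)

def generate_words_from_tiles_alt (tiles : List String) (blank_count : Int) : List String :=
  let real_tiles := tiles.filter (fun t => t ≠ "0")
  let top := min 7 (PySem.List.len tiles)
  let res := (PySem.List.pyRange 2 (top + 1)).foldl
    (fun (acc : List String × List (List String)) length =>
      let out := acc.1
      let prev := acc.2
      let cur := sortedCombos real_tiles length.toNat  -- length ≥ 2 from range(2, …); .toNat exact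
      let out := cur.foldl (fun out c => out ++ [PySem.Str.join "" c]) out
      let out := if blank_count > 0 then
          prev.foldl (fun out c =>
            pvLetters.foldl (fun out letter =>
              let w := PySem.Str.join "" (insertBack letter c)
              if 2 ≤ PySem.Str.len w then out ++ [w] else out) out) out
        else out
      (out, cur))
    ([], sortedCombos real_tiles 1)
  PySem.Set.ofList res.1

-- ===== PRECONDITION & SPEC =====
def Spec_generate_words_from_tiles (tiles : List String) (blank_count : Int) (out : List String) : Prop := out = generate_words_from_tiles_alt tiles blank_count
instance (tiles : List String) (blank_count : Int) (out : List String) : Decidable (Spec_generate_words_from_tiles tiles blank_count out) := by unfold Spec_generate_words_from_tiles; infer_instance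

-- ===== CLAIM (what is proved, stated in full; the proofs are below) =====
def Claim_equal_generate_words_from_tiles : Prop := ∀ (tiles : List String) (blank_count : Int), Dom_generate_words_from_tiles tiles blank_count → Spec_generate_words_from_tiles tiles blank_count (generate_words_from_tiles tiles blank_count)

-- ===== LEMMAS AND PROOFS =====

def wordP (w : String) : Bool := decide (2 ≤ PySem.Str.len w)

-- the word sequence A generates at word length k (k ≥ 2)
def stageA (real : List String) (bc : Int) (k : Nat) : List String :=
  (PySem.List.combinations real k).map (fun c => PySem.Str.join "" (PySem.List.sorted c id)) ++
  (if bc > 0 then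
    (PySem.List.combinations real (k - 1)).flatMap (fun c =>
      (pvLetters.map (fun L => PySem.Str.join "" (PySem.List.sorted (c ++ [L]) id))).filter wordP)
   else [])

-- the word sequence B generates at word length k
def stageB (real : List String) (bc : Int) (k : Nat) : List String :=
  (sortedCombos real k).map (fun c => PySem.Str.join "" c) ++
  (if bc > 0 then
    (sortedCombos real (k - 1)).flatMap (fun c =>
      (pvLetters.map (fun L => PySem.Str.join "" (insertBack L c))).filter wordP)
   else [])

theorem insertFront_perm (x : String) (l : List String) : (insertFront x l).Perm (x :: l) := by
  induction l with
  | nil => simp [insertFront]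
  | cons y ys ih =>
    simp only [insertFront]
    split
    · exact (ih.cons y).trans (List.Perm.swap x y ys)
    · exact List.Perm.refl _

theorem insertBack_perm (x : String) (l : List String) : (insertBack x l).Perm (x :: l) := by
  induction l with
  | nil => simp [insertBack]
  | cons y ys ih =>
    simp only [insertBack]
    split
    · exact (ih.cons y).trans (List.Perm.swap x y ys)
    · exact List.Perm.refl _

theorem insertFront_pairwise (x : String) (l : List String) (h : l.Pairwise (· ≤ ·)) :
    (insertFront x l).Pairwise (· ≤ ·) := by
  induction l with
  | nil => simp [insertFront]
  | cons y ys ih =>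
    simp only [insertFront]
    rcases List.pairwise_cons.mp h with ⟨hy, hys⟩
    split
    · rename_i hlt
      refine List.pairwise_cons.mpr ⟨?_, ih hys⟩
      intro a ha
      rcases List.mem_cons.mp ((insertFront_perm x ys).mem_iff.mp ha) with rfl | ha
      · exact le_of_lt hlt
      · exact hy a ha
    · rename_i hnlt
      refine List.pairwise_cons.mpr ⟨?_, h⟩
      intro a ha
      rcases List.mem_cons.mp ha with rfl | ha
      · exact le_of_not_gt hnlt
      · exact le_trans (le_of_not_gt hnlt) (hy a ha)

theorem insertBack_pairwise (x : String) (l : List String) (h : l.Pairwise (· ≤ ·)) :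
    (insertBack x l).Pairwise (· ≤ ·) := by
  induction l with
  | nil => simp [insertBack]
  | cons y ys ih =>
    simp only [insertBack]
    rcases List.pairwise_cons.mp h with ⟨hy, hys⟩
    split
    · rename_i hle
      refine List.pairwise_cons.mpr ⟨?_, ih hys⟩
      intro a ha
      rcases List.mem_cons.mp ((insertBack_perm x ys).mem_iff.mp ha) with rfl | ha
      · exact hle
      · exact hy a ha
    · rename_i hnle
      refine List.pairwise_cons.mpr ⟨?_, h⟩
      intro a ha
      rcases List.mem_cons.mp ha with rfl | ha
      · exact le_of_lt (lt_of_not_ge hnle)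
      · exact le_trans (le_of_lt (lt_of_not_ge hnle)) (hy a ha)

theorem sorted_pairwise_le (l : List String) : (PySem.List.sorted l id).Pairwise (· ≤ ·) := by
  simpa using PySem.List.sorted_pairwise l id

theorem eq_of_perm_pairwise {l₁ l₂ : List String} (hp : l₁.Perm l₂)
    (h₁ : l₁.Pairwise (· ≤ ·)) (h₂ : l₂.Pairwise (· ≤ ·)) : l₁ = l₂ :=
  List.eq_of_perm_of_sorted (fun a b _ _ hab hba => le_antisymm hab hba) h₁ h₂ hp

theorem insertFront_sorted_eq (x : String) (c : List String) :
    insertFront x (PySem.List.sorted c id) = PySem.List.sorted (x :: c) id := by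
  refine eq_of_perm_pairwise ?_ ?_ ?_
  · exact ((insertFront_perm x _).trans ((PySem.List.sorted_perm c id false).cons x)).trans
      (PySem.List.sorted_perm (x :: c) id false).symm
  · exact insertFront_pairwise x _ (sorted_pairwise_le c)
  · exact sorted_pairwise_le (x :: c)

theorem insertBack_sorted_eq (x : String) (c : List String) :
    insertBack x (PySem.List.sorted c id) = PySem.List.sorted (c ++ [x]) id := by
  refine eq_of_perm_pairwise ?_ ?_ ?_
  · refine ((insertBack_perm x _).trans ((PySem.List.sorted_perm c id false).cons x)).trans ?_
    exact ((List.perm_append_singleton x c).symm.trans (PySem.List.sorted_perm (c ++ [x]) id false).symm)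
  · exact insertBack_pairwise x _ (sorted_pairwise_le c)
  · exact sorted_pairwise_le (c ++ [x])

theorem sorted_nil_eq : PySem.List.sorted ([] : List String) id = [] := by
  have := PySem.List.sorted_perm ([] : List String) id false
  simpa using this.eq_nil

theorem sortedCombos_eq (xs : List String) (r : Nat) :
    sortedCombos xs r = (PySem.List.combinations xs r).map (fun c => PySem.List.sorted c id) := by
  induction xs generalizing r with
  | nil =>
    cases r with
    | zero => simp [sortedCombos, PySem.List.combinations_zero, sorted_nil_eq]
    | succ r => simp [sortedCombos, PySem.List.combinations_nil_succ]
  | cons x tail ih =>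
    cases r with
    | zero => simp [sortedCombos, PySem.List.combinations_zero, sorted_nil_eq]
    | succ r =>
      rw [show sortedCombos (x :: tail) (r + 1)
            = (sortedCombos tail r).map (insertFront x) ++ sortedCombos tail (r + 1) from rfl,
          PySem.List.combinations_cons_succ, List.map_append, ih, ih]
      congr 1
      simp only [List.map_map]
      exact List.map_congr_left (fun c _ => by
        simp only [Function.comp]
        exact insertFront_sorted_eq x c)

theorem blanks_eq (c : List String) :
    (pvLetters.map (fun L => PySem.Str.join "" (insertBack L (PySem.List.sorted c id)))).filter wordP
      = (pvLetters.map (fun L => PySem.Str.join "" (PySem.List.sorted (c ++ [L]) id))).filter wordP := by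
  congr 1
  exact List.map_congr_left (fun L _ => by rw [insertBack_sorted_eq])

theorem stageA_eq_stageB (real : List String) (bc : Int) (k : Nat) :
    stageA real bc k = stageB real bc k := by
  unfold stageA stageB
  rw [sortedCombos_eq real k, sortedCombos_eq real (k - 1), List.map_map, List.flatMap_map]

  rw [show (fun c => (pvLetters.map (fun L =>
        PySem.Str.join "" (insertBack L (PySem.List.sorted c id)))).filter wordP)
      = (fun c => (pvLetters.map (fun L =>
        PySem.Str.join "" (PySem.List.sorted (c ++ [L]) id))).filter wordP)
    from funext (fun c => blanks_eq c)]
  simp [Function.comp]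

-- generic set-fold shapes -------------------------------------------------

theorem foldl_add_map {α : Type} (l : List α) (f : α → String) (s : PySem.Set String) :
    l.foldl (fun s a => PySem.Set.add s (f a)) s = PySem.Set.update s (l.map f) := by
  simp [PySem.Set.update, List.foldl_map]

theorem update_append (s : PySem.Set String) (a b : List String) :
    PySem.Set.update s (a ++ b) = PySem.Set.update (PySem.Set.update s a) b := by
  simp [PySem.Set.update, List.foldl_append]

theorem foldl_update_flatMap {α : Type} (l : List α) (g : α → List String) (s : PySem.Set String) :
    l.foldl (fun s a => PySem.Set.update s (g a)) s = PySem.Set.update s (l.flatMap g) := by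
  induction l generalizing s with
  | nil => simp [PySem.Set.update]
  | cons a as ih => simp [List.flatMap_cons, update_append, ih]

theorem foldl_append_flatMap {α : Type} (l : List α) (g : α → List String) (acc : List String) :
    l.foldl (fun acc a => acc ++ g a) acc = acc ++ l.flatMap g := by
  induction l generalizing acc with
  | nil => simp
  | cons a as ih => simp [List.flatMap_cons, ih]

theorem foldl_append_if_len (l : List String) (f : String → String) (out : List String) :
    l.foldl (fun out L => if 2 ≤ PySem.Str.len (f L) then out ++ [f L] else out) out
      = out ++ (l.map f).filter wordP := by
  induction l generalizing out with
  | nil => simp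
  | cons L ls ih =>
    simp only [List.foldl_cons, List.map_cons, List.filter_cons]
    by_cases h : 2 ≤ PySem.Str.len (f L)
    · have hw : wordP (f L) = true := by simp only [wordP, decide_eq_true_eq]; exact h
      rw [if_pos h, hw, if_pos rfl, ih]
      simp
    · have hw : ¬ (wordP (f L) = true) := by simp only [wordP, decide_eq_true_eq]; exact h
      rw [if_neg h, if_neg hw, ih]

theorem foldl_add_if_len (l : List String) (f : String → String) (s : PySem.Set String) :
    l.foldl (fun s L => if 2 ≤ PySem.Str.len (f L) then PySem.Set.add s (f L) else s) s
      = PySem.Set.update s ((l.map f).filter wordP) := by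
  induction l generalizing s with
  | nil => simp [PySem.Set.update]
  | cons L ls ih =>
    simp only [List.foldl_cons, List.map_cons, List.filter_cons]
    by_cases h : 2 ≤ PySem.Str.len (f L)
    · have hw : wordP (f L) = true := by simp only [wordP, decide_eq_true_eq]; exact h
      rw [if_pos h, hw, if_pos rfl, ih]
      simp [PySem.Set.update]
    · have hw : ¬ (wordP (f L) = true) := by simp only [wordP, decide_eq_true_eq]; exact h
      rw [if_neg h, if_neg hw, ih]

-- A-side normal form ------------------------------------------------------

theorem portA_norm (tiles : List String) (bc : Int) (n : Nat) :
    (PySem.List.pyRange 2 (2 + (n : Int))).foldl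
      (fun words length =>
        let words := (PySem.List.combinations (tiles.filter (fun t => t ≠ "0")) length.toNat).foldl
          (fun words combo => PySem.Set.add words (PySem.Str.join "" (PySem.List.sorted combo id))) words
        if bc > 0 then
          (PySem.List.pyRange (max 1 (length - 1)) length).foldl (fun words base_length =>
            (PySem.List.combinations (tiles.filter (fun t => t ≠ "0")) base_length.toNat).foldl
              (fun words base_combo =>
              pvLetters.foldl (fun words letter =>
                let new_word := PySem.Str.join "" (PySem.List.sorted (base_combo ++ [letter]) id)
                if 2 ≤ PySem.Str.len new_word then PySem.Set.add words new_word else words)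
                words) words) words
        else words)
      PySem.Set.empty
    = PySem.Set.update PySem.Set.empty
        ((List.range' 2 n).flatMap (stageA (tiles.filter (fun t => t ≠ "0")) bc)) := by
  induction n with
  | zero =>
    rw [show (2 + ((0:Nat):Int)) = 2 by norm_num, PySem.List.pyRange_one_eq_nil (le_refl 2)]
    simp [PySem.Set.update]
  | succ n ih =>
    rw [show (2 + (((n+1):Nat):Int)) = (2 + (n:Int)) + 1 by push_cast; ring,
        PySem.List.pyRange_one_succ_right (by omega), List.foldl_append, ih,
        List.range'_concat, List.flatMap_append]
    simp only [List.foldl_cons, List.foldl_nil, List.flatMap_cons, List.flatMap_nil,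
      List.append_nil, one_mul]
    have ht : ((2:Int) + (n:Int)).toNat = n + 2 := by omega
    have ht1 : ((2:Int) + (n:Int) - 1).toNat = n + 1 := by omega
    have hmax : max 1 ((2:Int) + (n:Int) - 1) = 2 + (n:Int) - 1 := by omega
    have hrange : PySem.List.pyRange (2 + (n:Int) - 1) (2 + (n:Int))
        = [2 + (n:Int) - 1] := by
      rw [PySem.List.pyRange_one_cons (by omega),
          show (2 + (n:Int) - 1 + 1) = 2 + (n:Int) by ring,
          PySem.List.pyRange_one_eq_nil (le_refl _)]
    simp only [ht, hmax, hrange, foldl_add_map, List.foldl_cons, List.foldl_nil, ht1]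
    by_cases hbc : bc > 0
    · rw [if_pos hbc]
      have hinner : (fun (words : PySem.Set String) (base_combo : List String) =>
          pvLetters.foldl (fun words letter =>
            let new_word := PySem.Str.join "" (PySem.List.sorted (base_combo ++ [letter]) id)
            if 2 ≤ PySem.Str.len new_word then PySem.Set.add words new_word else words) words)
          = fun words base_combo => PySem.Set.update words
              ((pvLetters.map (fun L =>
                PySem.Str.join "" (PySem.List.sorted (base_combo ++ [L]) id))).filter wordP) := by
        funext words base_combo
        exact foldl_add_if_len pvLetters
          (fun L => PySem.Str.join "" (PySem.List.sorted (base_combo ++ [L]) id)) words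
      rw [hinner, foldl_update_flatMap]
      rw [show stageA (tiles.filter (fun t => t ≠ "0")) bc (2 + n)
            = (PySem.List.combinations (tiles.filter (fun t => t ≠ "0")) (n + 2)).map
                (fun c => PySem.Str.join "" (PySem.List.sorted c id)) ++
              (PySem.List.combinations (tiles.filter (fun t => t ≠ "0")) (n + 1)).flatMap
                (fun c => (pvLetters.map (fun L =>
                  PySem.Str.join "" (PySem.List.sorted (c ++ [L]) id))).filter wordP) from by
        simp [stageA, if_pos hbc, Nat.add_comm 2 n, show n + 2 - 1 = n + 1 from rfl]]
      rw [update_append, update_append]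
    · rw [if_neg hbc]
      rw [show stageA (tiles.filter (fun t => t ≠ "0")) bc (2 + n)
            = (PySem.List.combinations (tiles.filter (fun t => t ≠ "0")) (n + 2)).map
                (fun c => PySem.Str.join "" (PySem.List.sorted c id)) from by
        simp [stageA, if_neg hbc, Nat.add_comm 2 n]]
      rw [update_append]

-- B-side normal form ------------------------------------------------------

theorem portB_norm (real : List String) (bc : Int) (n : Nat) (out : List String) :
    (PySem.List.pyRange 2 (2 + (n : Int))).foldl
      (fun (acc : List String × List (List String)) length =>
        let out := acc.1
        let prev := acc.2
        let cur := sortedCombos real length.toNat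
        let out := cur.foldl (fun out c => out ++ [PySem.Str.join "" c]) out
        let out := if bc > 0 then
            prev.foldl (fun out c =>
              pvLetters.foldl (fun out letter =>
                let w := PySem.Str.join "" (insertBack letter c)
                if 2 ≤ PySem.Str.len w then out ++ [w] else out) out) out
          else out
        (out, cur))
      (out, sortedCombos real 1)
    = (out ++ (List.range' 2 n).flatMap (stageB real bc), sortedCombos real (n + 1)) := by
  induction n generalizing out with
  | zero =>
    rw [show (2 + ((0:Nat):Int)) = 2 by norm_num, PySem.List.pyRange_one_eq_nil (le_refl 2)]
    simp
  | succ n ih =>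
    rw [show (2 + (((n+1):Nat):Int)) = (2 + (n:Int)) + 1 by push_cast; ring,
        PySem.List.pyRange_one_succ_right (by omega), List.foldl_append, ih,
        List.range'_concat, List.flatMap_append]
    simp only [List.foldl_cons, List.foldl_nil, List.flatMap_cons, List.flatMap_nil,
      List.append_nil, one_mul]
    have ht : ((2:Int) + (n:Int)).toNat = n + 2 := by omega
    simp only [ht, PySem.List.foldl_append_singleton_eq_map]
    by_cases hbc : bc > 0
    · rw [if_pos hbc]
      have hinner : (fun (out : List String) (c : List String) =>
          pvLetters.foldl (fun out letter =>
            let w := PySem.Str.join "" (insertBack letter c)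
            if 2 ≤ PySem.Str.len w then out ++ [w] else out) out)
          = fun out c => out ++ ((pvLetters.map (fun L =>
              PySem.Str.join "" (insertBack L c))).filter wordP) := by
        funext out c
        exact foldl_append_if_len pvLetters (fun L => PySem.Str.join "" (insertBack L c)) out
      rw [hinner, foldl_append_flatMap]
      rw [show stageB real bc (2 + n)
            = (sortedCombos real (n + 2)).map (fun c => PySem.Str.join "" c) ++
              (sortedCombos real (n + 1)).flatMap (fun c => (pvLetters.map (fun L =>
                PySem.Str.join "" (insertBack L c))).filter wordP) from by
        simp [stageB, if_pos hbc, Nat.add_comm 2 n, show n + 2 - 1 = n + 1 from rfl]]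
      simp [List.append_assoc]
    · rw [if_neg hbc]
      rw [show stageB real bc (2 + n)
            = (sortedCombos real (n + 2)).map (fun c => PySem.Str.join "" c) from by
        simp [stageB, if_neg hbc, Nat.add_comm 2 n]]
      simp [List.append_assoc]

-- ===== VERDICT (by name: the statement is the Claim_ definition above) =====
theorem generate_words_from_tiles_spec : Claim_equal_generate_words_from_tiles := by
  intro tiles bc _
  show generate_words_from_tiles tiles bc = generate_words_from_tiles_alt tiles bc
  simp only [generate_words_from_tiles, generate_words_from_tiles_alt, PySem.List.len_eq]
  rcases Nat.eq_zero_or_pos tiles.length with hL | hL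
  · rw [show min 8 ((tiles.length : Int) + 1) = 1 by rw [hL]; norm_num,
        show min 7 (tiles.length : Int) + 1 = 1 by rw [hL]; norm_num,
        PySem.List.pyRange_one_eq_nil (by norm_num)]
    simp [PySem.Set.empty, PySem.Set.ofList_eq_foldl]
  · have hn : min 8 ((tiles.length : Int) + 1) = 2 + ((min 7 tiles.length - 1 : Nat) : Int) := by
      push_cast; omega
    have hn' : min 7 (tiles.length : Int) + 1 = 2 + ((min 7 tiles.length - 1 : Nat) : Int) := by
      push_cast; omega
    rw [hn, hn', portA_norm tiles bc (min 7 tiles.length - 1),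
        portB_norm (tiles.filter (fun t => t ≠ "0")) bc (min 7 tiles.length - 1) [],
        show stageA (tiles.filter (fun t => t ≠ "0")) bc = stageB (tiles.filter (fun t => t ≠ "0")) bc
          from funext (stageA_eq_stageB (tiles.filter (fun t => t ≠ "0")) bc)]
    simp [PySem.Set.update, PySem.Set.empty, PySem.Set.ofList_eq_foldl]
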